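-- pv_equiv track=rewrite | github.com/HikkyX86/data_mining | Pdata.py | convert
-- ===== SOURCE A (Python) =====
-- def convert(data):
--     cv_data = ''
--     i = 0
--     while i < len(data):
--         if data[i] == '[':
--             j = data.index(']', i)
--             elm = data[i+1:j]
--             cv_data += ' '.join(elm) + ' -1 '
--             i = j + 1
--         else:
--             cv_data += data[i]
--             i += 1
--     return cv_data
-- ===== SOURCE B (Python) =====
-- def convert(data):
--     out = []
--     i = 0
--     while True:
--         k = data.find('[', i)
--         if k == -1:
--             out.append(data[i:])
--             break
--         out.append(data[i:k])
--         j = data.index(']', k)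
--         out.append(' '.join(data[k + 1:j]) + ' -1 ')
--         i = j + 1
--     return ''.join(out)
-- ===== Notes on version B (the rewrite author's own statement) =====
-- stated objective: faster
-- what changed: B scans bracket-to-bracket with str.find/str.index, emitting each whole run of plain text and each bracket group as one piece collected in a list joined once at the end, instead of A's character-by-character while loop with repeated string concatenation.
import Mathlib
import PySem

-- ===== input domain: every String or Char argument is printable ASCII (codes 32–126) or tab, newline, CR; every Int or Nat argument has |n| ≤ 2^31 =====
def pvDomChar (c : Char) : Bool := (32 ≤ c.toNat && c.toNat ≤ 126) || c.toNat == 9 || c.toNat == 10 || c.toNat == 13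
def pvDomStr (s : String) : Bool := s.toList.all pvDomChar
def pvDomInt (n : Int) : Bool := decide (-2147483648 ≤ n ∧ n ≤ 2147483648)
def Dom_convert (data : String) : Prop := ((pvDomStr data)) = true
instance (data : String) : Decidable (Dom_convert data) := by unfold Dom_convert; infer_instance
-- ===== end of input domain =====

-- B scans bracket-to-bracket, emitting whole runs of plain text as single pieces joined once at the end, instead of A's char-by-char loop with repeated concatenation (objective: faster, measured); inputs where A raises ValueError (unmatched '[') are excluded by Pre_.

-- ' '.join over the characters of a string (both Pythons call ' '.join)
def joinSp (elm : List Char) : List Char := List.intersperse ' ' elm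

-- ===== PORT A =====
-- A's while loop, char by char; acc is cv_data.  Where Python raises ValueError
-- (no ']' after a reached '[') the port returns acc; such inputs are outside Pre_convert.
def loopA (cs : List Char) (acc : List Char) : List Char :=
  match cs with
  | [] => acc
  | c :: rest =>
    if c = '[' then
      match hne : rest.dropWhile (fun x => x ≠ ']') with
      | [] => acc   -- ValueError in Python (outside Pre_convert)
      | _ :: tail =>
        loopA tail (acc ++ joinSp (rest.takeWhile (fun x => x ≠ ']')) ++ [' ', '-', '1', ' '])
    else loopA rest (acc ++ [c])
termination_by cs.length
decreasing_by
  · have h1 : (rest.dropWhile (fun x => x ≠ ']')).length ≤ rest.length :=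
      List.length_dropWhile_le _ _
    rw [hne] at h1
    simp at h1 ⊢
    omega
  · simp

def convert (data : String) : String := String.ofList (loopA data.toList [])

-- ===== PORT B =====
-- B's loop: k = data.find('[', i) is the dropWhile split; emit data[i:k] as one piece,
-- then the bracket group; out is the list out of pieces, joined at the end.
def loopB (cs : List Char) (out : List (List Char)) : List (List Char) :=
  match hk : cs.dropWhile (fun x => x ≠ '[') with
  | [] => out ++ [cs.takeWhile (fun x => x ≠ '[')]   -- k == -1: append data[i:], stop
  | _ :: rest =>
    match hj : rest.dropWhile (fun x => x ≠ ']') with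
    | [] => out   -- ValueError in Python (outside Pre_convert)
    | _ :: tail =>
      loopB tail (out ++ [cs.takeWhile (fun x => x ≠ '['),
                          joinSp (rest.takeWhile (fun x => x ≠ ']')) ++ [' ', '-', '1', ' ']])
termination_by cs.length
decreasing_by
  have h0 : (cs.dropWhile (fun x => x ≠ '[')).length ≤ cs.length := List.length_dropWhile_le _ _
  have h1 : (rest.dropWhile (fun x => x ≠ ']')).length ≤ rest.length := List.length_dropWhile_le _ _
  rw [hk] at h0
  rw [hj] at h1
  simp at h0 h1 ⊢
  omega

def convert_alt (data : String) : String := String.ofList (loopB data.toList []).flatten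

-- ===== PRECONDITION & SPEC =====
-- Pre_convert excludes exactly the inputs on which A raises ValueError: a '[' with no ']' anywhere after it.
def Pre_convert (data : String) : Prop :=
  ∀ i < data.toList.length, data.toList[i]? = some '[' →
    ∃ j < data.toList.length, i < j ∧ data.toList[j]? = some ']'
instance (data : String) : Decidable (Pre_convert data) := by unfold Pre_convert; infer_instance

def pvWitness_convert : String := "a[bc]d"

def Spec_convert (data : String) (out : String) : Prop := out = convert_alt data
instance (data : String) (out : String) : Decidable (Spec_convert data out) := by unfold Spec_convert; infer_instance

-- ===== CLAIM (what is proved, stated in full; the proofs are below) =====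
def Claim_equal_convert : Prop := ∀ (data : String), Dom_convert data → Pre_convert data → Spec_convert data (convert data)

-- ===== LEMMAS AND PROOFS =====

-- equation lemmas for the two loops
lemma loopA_nil (acc : List Char) : loopA [] acc = acc := by rw [loopA]

lemma loopA_bracket_bad (rest acc : List Char)
    (hne : rest.dropWhile (fun x => x ≠ ']') = []) :
    loopA ('[' :: rest) acc = acc := by
  rw [loopA, if_pos rfl]
  split
  · rfl
  · next x tail heq => rw [hne] at heq; cases heq

lemma loopA_bracket (rest acc : List Char) (x : Char) (tail : List Char)
    (hne : rest.dropWhile (fun x => x ≠ ']') = x :: tail) :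
    loopA ('[' :: rest) acc =
      loopA tail (acc ++ joinSp (rest.takeWhile (fun x => x ≠ ']')) ++ [' ', '-', '1', ' ']) := by
  rw [loopA, if_pos rfl]
  split
  · next heq => rw [hne] at heq; cases heq
  · next x' tail' heq =>
      rw [hne] at heq
      injection heq with h1 h2
      subst h2
      rfl

lemma loopA_other (c : Char) (rest acc : List Char) (hc : ¬ c = '[') :
    loopA (c :: rest) acc = loopA rest (acc ++ [c]) := by
  rw [loopA, if_neg hc]

lemma loopB_stop (cs : List Char) (out : List (List Char))
    (hk : cs.dropWhile (fun x => x ≠ '[') = []) :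
    loopB cs out = out ++ [cs.takeWhile (fun x => x ≠ '[')] := by
  rw [loopB]
  split
  · rfl
  · next x rest heq => rw [hk] at heq; cases heq

lemma loopB_bad (cs : List Char) (out : List (List Char)) (x : Char) (rest : List Char)
    (hk : cs.dropWhile (fun x => x ≠ '[') = x :: rest)
    (hj : rest.dropWhile (fun x => x ≠ ']') = []) :
    loopB cs out = out := by
  rw [loopB]
  split
  · next heq => rw [hk] at heq; cases heq
  · next x' rest' heq =>
      rw [hk] at heq
      injection heq with h1 h2
      subst h2
      split
      · rfl
      · next y' tail' heq2 => rw [hj] at heq2; cases heq2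

lemma loopB_step (cs : List Char) (out : List (List Char)) (x y : Char) (rest tail : List Char)
    (hk : cs.dropWhile (fun x => x ≠ '[') = x :: rest)
    (hj : rest.dropWhile (fun x => x ≠ ']') = y :: tail) :
    loopB cs out = loopB tail (out ++ [cs.takeWhile (fun x => x ≠ '['),
        joinSp (rest.takeWhile (fun x => x ≠ ']')) ++ [' ', '-', '1', ' ']]) := by
  rw [loopB]
  split
  · next heq => rw [hk] at heq; cases heq
  · next x' rest' heq =>
      rw [hk] at heq
      injection heq with h1 h2
      subst h2
      split
      · next heq2 => rw [hj] at heq2; cases heq2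
      · next y' tail' heq2 =>
          rw [hj] at heq2
          injection heq2 with h3 h4
          subst h4
          rfl

-- list-level form of the precondition, convenient for induction
def PreL (cs : List Char) : Prop := ∀ l r, cs = l ++ '[' :: r → ']' ∈ r

lemma preL_of_pre (data : String) (h : Pre_convert data) : PreL data.toList := by
  intro l r hlr
  have hi : data.toList[l.length]? = some '[' := by
    rw [hlr, List.getElem?_append_right (le_refl _)]
    simp
  have hlen : l.length < data.toList.length := by
    rw [hlr]; simp
  obtain ⟨j, hj, hij, hjv⟩ := h l.length hlen hi
  rw [hlr, List.getElem?_append_right (by omega)] at hjv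
  have hne : j - l.length ≠ 0 := by omega
  rcases Nat.exists_eq_succ_of_ne_zero hne with ⟨m, hm⟩
  rw [hm] at hjv
  simp at hjv
  exact List.mem_of_getElem? hjv

lemma preL_cons (c : Char) (rest : List Char) (h : PreL (c :: rest)) : PreL rest := by
  intro l r hlr
  exact h (c :: l) r (by simp [hlr])

lemma head_dropWhile_eq (p : Char → Bool) (l tail : List Char) (x : Char)
    (h : l.dropWhile p = x :: tail) : p x = false := by
  induction l with
  | nil => simp at h
  | cons a t ih =>
    rw [List.dropWhile_cons] at h
    by_cases hp : p a = true
    · rw [if_pos hp] at h; exact ih h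
    · rw [if_neg hp] at h
      injection h with h1 h2
      subst h1
      simpa using hp

lemma split_of_dropWhile (p : Char → Bool) (l tail : List Char) (x : Char)
    (h : l.dropWhile p = x :: tail) : l = l.takeWhile p ++ x :: tail := by
  have h2 := List.takeWhile_append_dropWhile (p := p) (l := l)
  rw [h] at h2
  exact h2.symm

-- if cs satisfies PreL and has a '[' at all, there is a ']' after it
lemma preL_good (cs : List Char) (h : PreL cs) (x : Char) (rest : List Char)
    (hk : cs.dropWhile (fun x => x ≠ '[') = x :: rest) :
    rest.dropWhile (fun x => x ≠ ']') ≠ [] := by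
  have hx : x = '[' := by
    have := head_dropWhile_eq _ cs rest x hk
    simpa using this
  have hmem : ']' ∈ rest := by
    apply h (cs.takeWhile (fun x => x ≠ '[')) rest
    conv_lhs => rw [split_of_dropWhile _ cs rest x hk]
    rw [hx]
  intro hn
  rw [List.dropWhile_eq_nil_iff] at hn
  have := hn ']' hmem
  simp at this

-- PreL survives consuming one bracket group
lemma preL_tail (cs : List Char) (h : PreL cs) (x y : Char) (rest tail : List Char)
    (hk : cs.dropWhile (fun x => x ≠ '[') = x :: rest)
    (hj : rest.dropWhile (fun x => x ≠ ']') = y :: tail) :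
    PreL tail := by
  have hx : x = '[' := by simpa using head_dropWhile_eq _ cs rest x hk
  have hy : y = ']' := by simpa using head_dropWhile_eq _ rest tail y hj
  intro l r hlr
  apply h (cs.takeWhile (fun x => x ≠ '[') ++ '[' :: rest.takeWhile (fun x => x ≠ ']') ++ ']' :: l) r
  conv_lhs => rw [split_of_dropWhile _ cs rest x hk]
  conv_lhs => rw [split_of_dropWhile _ rest tail y hj]
  rw [hx, hy, hlr]
  simp

-- accumulator lemmas, by strong induction on the length
lemma loopA_acc : ∀ (n : Nat) (cs : List Char), cs.length ≤ n →
    ∀ acc, loopA cs acc = acc ++ loopA cs [] := by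
  intro n
  induction n with
  | zero =>
    intro cs hlen acc
    have : cs = [] := List.length_eq_zero_iff.mp (Nat.le_zero.mp hlen)
    subst this; simp [loopA_nil]
  | succ n ih =>
    intro cs hlen acc
    match cs with
    | [] => simp [loopA_nil]
    | c :: rest =>
      by_cases hc : c = '['
      · subst hc
        cases hne : rest.dropWhile (fun x => x ≠ ']') with
        | nil => rw [loopA_bracket_bad _ _ hne, loopA_bracket_bad _ _ hne]; simp
        | cons y tail =>
          rw [loopA_bracket _ _ _ _ hne, loopA_bracket _ _ _ _ hne]
          have htl : tail.length ≤ n := by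
            have h1 : (rest.dropWhile (fun x => x ≠ ']')).length ≤ rest.length :=
              List.length_dropWhile_le _ _
            rw [hne] at h1; simp at h1 hlen; omega
          rw [ih tail htl]
          conv_rhs => rw [ih tail htl]
          simp
      · rw [loopA_other _ _ _ hc, loopA_other _ _ _ hc]
        have : rest.length ≤ n := by simp at hlen; omega
        rw [ih rest this]
        conv_rhs => rw [ih rest this]
        simp

lemma loopB_acc : ∀ (n : Nat) (cs : List Char), cs.length ≤ n →
    ∀ out, loopB cs out = out ++ loopB cs [] := by
  intro n
  induction n with
  | zero =>
    intro cs hlen out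
    have : cs = [] := List.length_eq_zero_iff.mp (Nat.le_zero.mp hlen)
    subst this
    rw [loopB_stop _ _ (by simp), loopB_stop _ _ (by simp)]
    simp
  | succ n ih =>
    intro cs hlen out
    cases hk : cs.dropWhile (fun x => x ≠ '[') with
    | nil => rw [loopB_stop _ _ hk, loopB_stop _ _ hk]; simp
    | cons x rest =>
      cases hj : rest.dropWhile (fun x => x ≠ ']') with
      | nil => rw [loopB_bad _ _ _ _ hk hj, loopB_bad _ _ _ _ hk hj]; simp
      | cons y tail =>
        rw [loopB_step _ _ _ _ _ _ hk hj, loopB_step _ _ _ _ _ _ hk hj]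
        have htl : tail.length ≤ n := by
          have h0 : (cs.dropWhile (fun x => x ≠ '[')).length ≤ cs.length :=
            List.length_dropWhile_le _ _
          have h1 : (rest.dropWhile (fun x => x ≠ ']')).length ≤ rest.length :=
            List.length_dropWhile_le _ _
          rw [hk] at h0; rw [hj] at h1; simp at h0 h1; omega
        rw [ih tail htl]
        conv_rhs => rw [ih tail htl]
        simp

-- main equivalence on lists
lemma main_list : ∀ (n : Nat) (cs : List Char), cs.length ≤ n → PreL cs →
    loopA cs [] = (loopB cs []).flatten := by
  intro n
  induction n with
  | zero =>
    intro cs hlen _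
    have : cs = [] := List.length_eq_zero_iff.mp (Nat.le_zero.mp hlen)
    subst this
    rw [loopA_nil, loopB_stop _ _ (by simp)]
    simp
  | succ n ih =>
    intro cs hlen hpre
    match cs with
    | [] => rw [loopA_nil, loopB_stop _ _ (by simp)]; simp
    | c :: rest =>
      by_cases hc : c = '['
      · subst hc
        have hk : ('[' :: rest).dropWhile (fun x => x ≠ '[') = '[' :: rest := by
          rw [List.dropWhile_cons]; simp
        cases hne : rest.dropWhile (fun x => x ≠ ']') with
        | nil => exact absurd hne (preL_good _ hpre _ _ hk)
        | cons y tail =>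
          have htl : tail.length ≤ n := by
            have h1 : (rest.dropWhile (fun x => x ≠ ']')).length ≤ rest.length :=
              List.length_dropWhile_le _ _
            rw [hne] at h1; simp at h1 hlen; omega
          rw [loopA_bracket _ _ _ _ hne, loopB_step _ _ _ _ _ _ hk hne]
          rw [loopA_acc tail.length tail (le_refl _),
              loopB_acc tail.length tail (le_refl _)]
          rw [ih tail htl (preL_tail _ hpre _ _ _ _ hk hne)]
          have htw : ('[' :: rest).takeWhile (fun x => x ≠ '[') = [] := by
            rw [List.takeWhile_cons]; simp
          rw [htw]
          simp
      · -- c is not '[': B's pre run absorbs c in front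
        have hrl : rest.length ≤ n := by simp at hlen; omega
        rw [loopA_other _ _ _ hc,
            loopA_acc rest.length rest (le_refl _),
            ih rest hrl (preL_cons _ _ hpre)]
        have hdw : (c :: rest).dropWhile (fun x => x ≠ '[') =
            rest.dropWhile (fun x => x ≠ '[') := by
          rw [List.dropWhile_cons]; simp [hc]
        have htw : (c :: rest).takeWhile (fun x => x ≠ '[') =
            c :: rest.takeWhile (fun x => x ≠ '[') := by
          rw [List.takeWhile_cons]; simp [hc]
        cases hk : rest.dropWhile (fun x => x ≠ '[') with
        | nil =>
          rw [loopB_stop (c :: rest) _ (by rw [hdw, hk]),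
              loopB_stop rest _ hk, htw]
          simp
        | cons x rest2 =>
          cases hj : rest2.dropWhile (fun x => x ≠ ']') with
          | nil =>
            exact absurd hj (preL_good rest (preL_cons _ _ hpre) _ _ hk)
          | cons y tail =>
            rw [loopB_step (c :: rest) _ x y rest2 tail (by rw [hdw, hk]) hj,
                loopB_step rest _ x y rest2 tail hk hj, htw]
            rw [loopB_acc tail.length tail (le_refl _)]
            conv_rhs => rw [loopB_acc tail.length tail (le_refl _)]
            simp

-- ===== VERDICT (by name: the statement is the Claim_ definition above) =====
theorem convert_spec : Claim_equal_convert := by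
  intro data _ hpre
  unfold Spec_convert convert convert_alt
  rw [main_list data.toList.length data.toList (le_refl _) (preL_of_pre data hpre)]
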